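-- pv_equiv track=rewrite | github.com/paiml/depyler | examples/hard_sec_aes_sbox.py | verify_sbox_properties
-- ===== SOURCE A (Python) =====
-- from typing import List, Tuple
--
-- def verify_sbox_properties(sbox: List[int]) -> bool:
--     """Verify that the S-box has expected cryptographic properties."""
--     if len(sbox) != 256:
--         return False
--     seen: List[int] = [0] * 256
--     for i in range(256):
--         val: int = sbox[i]
--         if val < 0 or val > 255:
--             return False
--         seen[val] = seen[val] + 1
--     for i in range(256):
--         if seen[i] != 1:
--             return False
--     return True
-- ===== SOURCE B (Python) =====
-- def verify_sbox_properties(sbox):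
--     """Verify that the S-box has expected cryptographic properties."""
--     return len(sbox) == 256 and sorted(sbox) == list(range(256))
-- ===== Notes on version B (the rewrite author's own statement) =====
-- stated objective: simpler
-- what changed: Replaces the two-pass counting-bucket check (range test + count array + all-ones scan) with a single sort of a copy of sbox compared element-wise against list(range(256)).
import Mathlib
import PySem

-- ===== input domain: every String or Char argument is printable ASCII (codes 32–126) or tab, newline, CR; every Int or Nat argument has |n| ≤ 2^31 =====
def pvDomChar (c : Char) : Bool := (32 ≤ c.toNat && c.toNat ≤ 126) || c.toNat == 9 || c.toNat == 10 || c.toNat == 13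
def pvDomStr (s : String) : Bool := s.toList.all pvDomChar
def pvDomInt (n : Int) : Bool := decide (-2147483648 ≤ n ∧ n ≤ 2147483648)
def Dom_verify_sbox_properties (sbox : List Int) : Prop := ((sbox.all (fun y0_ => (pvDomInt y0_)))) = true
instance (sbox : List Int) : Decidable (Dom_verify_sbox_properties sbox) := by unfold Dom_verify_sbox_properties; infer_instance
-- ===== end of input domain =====

-- B replaces A's two-pass counting-bucket permutation check with sort-and-compare
-- against list(range(256)); objective: simpler.

-- ===== PORT A =====
-- First loop: 'for i in range(256): val = sbox[i] …' over a list of length exactly 256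
-- reads sbox[0], …, sbox[255] in order, ported as structural recursion over sbox.
-- 'return False' inside the loop is the 'none' result.
def vspCount : List Int → List Int → Option (List Int)
  | [], seen => some seen
  | val :: rest, seen =>
      if val < 0 || val > 255 then none
      else vspCount rest (seen.set val.toNat (seen.getD val.toNat 0 + 1))

-- Second loop: 'for i in range(256): if seen[i] != 1: return False' over the
-- length-256 list seen, ported as structural recursion over seen.
def vspCheck : List Int → Bool
  | [] => true
  | c :: rest => if c ≠ 1 then false else vspCheck rest

def verify_sbox_properties (sbox : List Int) : Bool :=
  if sbox.length ≠ 256 then false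
  else
    match vspCount sbox (List.replicate 256 0) with
    | none => false
    | some seen => vspCheck seen

-- ===== PORT B =====
def verify_sbox_properties_alt (sbox : List Int) : Bool :=
  decide (sbox.length = 256)
    && (PySem.List.sorted sbox (fun x => x) false == PySem.List.pyRange 0 256 1)

-- ===== PRECONDITION & SPEC =====
def Spec_verify_sbox_properties (sbox : List Int) (out : Bool) : Prop := out = verify_sbox_properties_alt sbox
instance (sbox : List Int) (out : Bool) : Decidable (Spec_verify_sbox_properties sbox out) := by unfold Spec_verify_sbox_properties; infer_instance

-- ===== CLAIM (what is proved, stated in full; the proofs are below) =====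
def Claim_equal_verify_sbox_properties : Prop := ∀ (sbox : List Int), Dom_verify_sbox_properties sbox → Spec_verify_sbox_properties sbox (verify_sbox_properties sbox)

-- ===== LEMMAS AND PROOFS =====

-- the identity list [0, 1, …, 255]
def vspIdent : List Int := PySem.List.pyRange 0 256 1

-- vspCount succeeds iff every element is in range 0..255
theorem vspCount_isSome (xs seen : List Int) :
    (vspCount xs seen).isSome = true ↔ ∀ v ∈ xs, 0 ≤ v ∧ v ≤ 255 := by
  induction xs generalizing seen with
  | nil => simp [vspCount]
  | cons v rest ih =>
    by_cases h : v < 0 || v > 255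
    · simp only [vspCount, h, if_pos]
      simp only [Option.isSome_none, List.mem_cons]
      constructor
      · intro hc; cases hc
      · intro hall
        have := hall v (Or.inl rfl)
        simp only [decide_eq_true_eq, Bool.or_eq_true, decide_eq_true_eq] at h
        omega
    · simp only [vspCount, h, if_neg, Bool.false_eq_true, not_false_iff]
      rw [ih]
      simp only [Bool.or_eq_true, decide_eq_true_eq, not_or, not_lt, not_lt] at h
      constructor
      · intro hall x hx
        rcases List.mem_cons.mp hx with rfl | hx
        · omega
        · exact hall x hx
      · intro hall x hx; exact hall x (List.mem_cons_of_mem _ hx)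

-- counting invariant: entry k of the result is the initial entry plus the count of k in xs
theorem vspCount_getD (xs : List Int) (hgood : ∀ v ∈ xs, 0 ≤ v ∧ v ≤ 255) :
    ∀ (seen : List Int), seen.length = 256 →
      ∃ seen', vspCount xs seen = some seen' ∧ seen'.length = 256 ∧
        ∀ k : Nat, k < 256 → seen'.getD k 0 = seen.getD k 0 + xs.count ((k : Int)) := by
  induction xs with
  | nil => intro seen hlen; exact ⟨seen, rfl, hlen, by simp⟩
  | cons v rest ih =>
    intro seen hlen
    have hv := hgood v (List.mem_cons_self ..)
    have hcond : ¬ (v < 0 || v > 255) = true := by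
      simp only [Bool.or_eq_true, decide_eq_true_eq]; omega
    have hvn : v.toNat < 256 := by omega
    set seen1 := seen.set v.toNat (seen.getD v.toNat 0 + 1) with hseen1
    have hlen1 : seen1.length = 256 := by simp [hseen1, hlen]
    obtain ⟨seen', heq, hlen', hspec⟩ :=
      ih (fun x hx => hgood x (List.mem_cons_of_mem _ hx)) seen1 hlen1
    refine ⟨seen', by simp only [vspCount]; rw [if_neg hcond]; exact heq, hlen', ?_⟩
    intro k hk
    have hget1 : seen1.getD k 0 = seen.getD k 0 + (if k = v.toNat then 1 else 0) := by
      by_cases hkv : k = v.toNat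
      · subst hkv
        simp [hseen1, List.getD, hlen, hk]
      · simp [hseen1, List.getD, List.getElem?_set_ne (Ne.symm hkv), hkv]
    have hcount : (v :: rest).count ((k : Int)) =
        rest.count ((k : Int)) + (if k = v.toNat then 1 else 0) := by
      rw [List.count_cons]
      by_cases hkv : k = v.toNat
      · have : v = (k : Int) := by omega
        simp [this]
      · have : v ≠ (k : Int) := by omega
        simp [this, hkv]
    rw [hspec k hk, hget1, hcount]; push_cast; ring

-- vspCheck is the all-ones test
theorem vspCheck_iff (seen : List Int) :
    vspCheck seen = true ↔ ∀ c ∈ seen, c = 1 := by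
  induction seen with
  | nil => simp [vspCheck]
  | cons c rest ih =>
    by_cases h : c = 1
    · simp [vspCheck, h, ih]
    · simp [vspCheck, h]

-- membership in a length-256 list ↔ indexed getD values
theorem all_ones_iff_getD (seen : List Int) (hlen : seen.length = 256) :
    (∀ c ∈ seen, c = 1) ↔ ∀ k : Nat, k < 256 → seen.getD k 0 = 1 := by
  constructor
  · intro h k hk
    have hk' : k < seen.length := by omega
    rw [List.getD_eq_getElem _ _ hk']
    exact h _ (seen.getElem_mem hk')
  · intro h c hc
    obtain ⟨k, hk, rfl⟩ := List.getElem_of_mem hc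
    have := h k (by omega)
    rwa [List.getD_eq_getElem _ _ hk] at this

theorem length_vspIdent : vspIdent.length = 256 := by
  unfold vspIdent; rw [PySem.List.length_pyRange_one]; decide

theorem mem_vspIdent {a : Int} : a ∈ vspIdent ↔ 0 ≤ a ∧ a < 256 := by
  unfold vspIdent; exact PySem.List.mem_pyRange_one

-- count of any value in the identity list
theorem count_vspIdent (a : Int) :
    vspIdent.count a = if 0 ≤ a ∧ a < 256 then 1 else 0 := by
  by_cases h : 0 ≤ a ∧ a < 256
  · rw [if_pos h]
    exact List.count_eq_one_of_mem (by unfold vspIdent; exact PySem.List.nodup_pyRange_one 0 256)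
      (mem_vspIdent.mpr (by omega))
  · rw [if_neg h]
    exact List.count_eq_zero_of_not_mem (fun hm => h (mem_vspIdent.mp hm))

-- A returns true exactly on permutations of 0..255
theorem portA_true_iff (sbox : List Int) :
    verify_sbox_properties sbox = true ↔ sbox.Perm vspIdent := by
  constructor
  · intro h
    unfold verify_sbox_properties at h
    by_cases hlen : sbox.length = 256
    · rw [if_neg (by omega)] at h
      cases heq : vspCount sbox (List.replicate 256 0) with
      | none => rw [heq] at h; cases h
      | some seen =>
        rw [heq] at h
        have hgood : ∀ v ∈ sbox, 0 ≤ v ∧ v ≤ 255 := by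
          rw [← vspCount_isSome sbox (List.replicate 256 0), heq]; rfl
        obtain ⟨seen', heq', hlen', hspec⟩ :=
          vspCount_getD sbox hgood (List.replicate 256 0) (by rw [List.length_replicate])
        have hss : seen = seen' := by rw [heq] at heq'; exact Option.some.inj heq'
        subst hss
        have hones := (all_ones_iff_getD _ hlen').mp ((vspCheck_iff _).mp h)
        rw [List.perm_iff_count]
        intro a
        rw [count_vspIdent]
        by_cases ha : 0 ≤ a ∧ a < 256
        · rw [if_pos ha]
          have hk : a.toNat < 256 := by omega
          have := hspec a.toNat hk
          rw [hones a.toNat hk, List.getD_replicate (0 : Int) hk] at this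
          have ha' : ((a.toNat : Nat) : Int) = a := by omega
          rw [ha'] at this
          omega
        · rw [if_neg ha]
          refine List.count_eq_zero_of_not_mem (fun hmem => ?_)
          have := hgood a hmem; omega
    · rw [if_pos (by omega)] at h; cases h
  · intro hperm
    have hlen : sbox.length = 256 := by
      have h1 := hperm.length_eq
      rw [length_vspIdent] at h1; exact h1
    have hgood : ∀ v ∈ sbox, 0 ≤ v ∧ v ≤ 255 := by
      intro v hv
      have : v ∈ vspIdent := hperm.mem_iff.mp hv
      have := mem_vspIdent.mp this; omega
    obtain ⟨seen', heq', hlen', hspec⟩ :=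
      vspCount_getD sbox hgood (List.replicate 256 0) (by rw [List.length_replicate])
    unfold verify_sbox_properties
    rw [if_neg (by omega), heq']
    rw [vspCheck_iff, all_ones_iff_getD seen' hlen']
    intro k hk
    rw [hspec k hk, List.getD_replicate (0 : Int) hk]
    have := (List.perm_iff_count.mp hperm) ((k : Int))
    rw [count_vspIdent] at this
    have hki : (0 : Int) ≤ (k : Int) ∧ ((k : Int)) < 256 := by omega
    rw [if_pos hki] at this
    omega

-- B returns true exactly on permutations of 0..255
theorem portB_true_iff (sbox : List Int) :
    verify_sbox_properties_alt sbox = true ↔ sbox.Perm vspIdent := by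
  unfold verify_sbox_properties_alt
  simp only [Bool.and_eq_true, decide_eq_true_eq, beq_iff_eq]
  constructor
  · rintro ⟨-, hsort⟩
    have hperm : (PySem.List.sorted sbox (fun x => x) false).Perm sbox :=
      PySem.List.sorted_perm ..
    rw [hsort] at hperm
    exact hperm.symm
  · intro hperm
    refine ⟨by have h1 := hperm.length_eq; rw [length_vspIdent] at h1; exact h1, ?_⟩
    exact PySem.List.sorted_eq_of_perm_of_pairwise_lt sbox vspIdent (fun x => x)
      hperm.symm (by unfold vspIdent; exact PySem.List.pairwise_lt_pyRange_one 0 256)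

-- ===== VERDICT (by name: the statement is the Claim_ definition above) =====
theorem verify_sbox_properties_spec : Claim_equal_verify_sbox_properties := by
  intro sbox _
  unfold Spec_verify_sbox_properties
  rw [Bool.eq_iff_iff, portA_true_iff, portB_true_iff]
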